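-- pv_equiv track=rewrite | github.com/cs88-website/su25 | assets/slides/09.py | large
-- ===== SOURCE A (Python) =====
-- def sum_list(s):
--     """Sum the elements of list s.
--
--     >>> sum([2, 4, 1, 3])
--     10
--     """
--     if len(s) == 0:
--         return 0
--     else:
--         return s[0] + sum_list(s[1:])
--
-- def large(s, n):
--     """Return the sublist of positive numbers s with the largest sum up to n.
--
--     >>> large([4, 2, 5, 6, 7], 1)
--     []
--     >>> large([4, 2, 5, 6, 7], 3)
--     [2]
--     >>> large([4, 2, 5, 6, 7], 8)
--     [2, 6]
--     >>> large([4, 2, 5, 6, 7], 19)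
--     [4, 2, 6, 7]
--     >>> large([4, 2, 5, 6, 7], 20)
--     [2, 5, 6, 7]
--     >>> large([4, 2, 5, 6, 7], 24)
--     [4, 2, 5, 6, 7]
--     """
--     if s == []:
--         return []
--     elif s[0] > n:
--         return large(s[1:], n)
--     else:
--         first = s[0]  # a number
--         with_s0 = [first] + large(s[1:], n - first)
--         without_s0 = large(s[1:], n)
--         if sum_list(with_s0) > sum_list(without_s0):
--             return with_s0
--         else:
--             return without_s0
-- ===== SOURCE B (Python) =====
-- def large(s, n):
--     """Return the sublist of positive numbers s with the largest sum up to n.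
--
--     Memoized knapsack search over (index, remaining budget), carrying each
--     candidate's sum alongside it so sums are never recomputed.
--     """
--     memo = {}
--
--     def best(i, budget):
--         if i == len(s):
--             return (0, [])
--         key = (i, budget)
--         if key in memo:
--             return memo[key]
--         skip = best(i + 1, budget)
--         if s[i] <= budget:
--             tsum, tail = best(i + 1, budget - s[i])
--             take = (s[i] + tsum, [s[i]] + tail)
--             res = take if take[0] > skip[0] else skip
--         else:
--             res = skip
--         memo[key] = res
--         return res
--
--     return best(0, n)[1]
-- ===== Notes on version B (the rewrite author's own statement) =====
-- stated objective: alternative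
-- what changed: Replaces the naive double recursion (which re-walks candidate lists with sum_list at every node and slices the list) with an index-based top-down dynamic program: a memo dict keyed by (index, remaining budget) whose entries carry the candidate's sum alongside the list, so sums are never recomputed and repeated (index, budget) states are solved once.
import Mathlib
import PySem

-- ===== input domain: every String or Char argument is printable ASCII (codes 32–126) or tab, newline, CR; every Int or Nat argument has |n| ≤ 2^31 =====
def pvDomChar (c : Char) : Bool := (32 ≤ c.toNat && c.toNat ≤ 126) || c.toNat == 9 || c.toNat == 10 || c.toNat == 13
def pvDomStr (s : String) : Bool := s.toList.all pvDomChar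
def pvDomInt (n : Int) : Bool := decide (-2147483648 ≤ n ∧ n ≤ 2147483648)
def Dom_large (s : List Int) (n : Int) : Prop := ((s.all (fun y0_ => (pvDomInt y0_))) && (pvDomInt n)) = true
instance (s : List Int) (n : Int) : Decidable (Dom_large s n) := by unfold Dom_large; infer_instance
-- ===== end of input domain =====

-- B replaces A's naive double recursion (with sum_list recomputation) by a memoized
-- index/budget dynamic program carrying running sums (objective: alternative).

-- ===== PORT A =====
def sumList : List Int → Int
  | [] => 0
  | a :: t => a + sumList t

def large (s : List Int) (n : Int) : List Int :=
  match s with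
  | [] => []
  | a :: t =>
    if a > n then large t n
    else
      let with_s0 := a :: large t (n - a)
      let without_s0 := large t n
      if sumList with_s0 > sumList without_s0 then with_s0 else without_s0

-- ===== PORT B =====
-- memoized best (i, budget) → (sum, list); the memo dict is threaded through
def goB : List Int → Int → Int → PySem.Dict (Int × Int) (Int × List Int) →
    ((Int × List Int) × PySem.Dict (Int × Int) (Int × List Int))
  | [], _, _, m => ((0, []), m)
  | a :: t, i, b, m =>
    match m.get? (i, b) with
    | some v => (v, m)
    | none =>
      let r1 := goB t (i + 1) b m
      let skip := r1.1
      let r2 :=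
        if a ≤ b then
          let r1' := goB t (i + 1) (b - a) r1.2
          let take := (a + r1'.1.1, a :: r1'.1.2)
          ((if take.1 > skip.1 then take else skip), r1'.2)
        else (skip, r1.2)
      (r2.1, r2.2.insert (i, b) r2.1)

def large_alt (s : List Int) (n : Int) : List Int :=
  (goB s 0 n PySem.Dict.empty).1.2

-- ===== PRECONDITION & SPEC =====
def Spec_large (s : List Int) (n : Int) (out : List Int) : Prop := out = large_alt s n
instance (s : List Int) (n : Int) (out : List Int) : Decidable (Spec_large s n out) := by unfold Spec_large; infer_instance

-- ===== CLAIM (what is proved, stated in full; the proofs are below) =====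
def Claim_equal_large : Prop := ∀ (s : List Int) (n : Int), Dom_large s n → Spec_large s n (large s n)

-- ===== LEMMAS AND PROOFS =====

-- every memo entry at key ((j : Int), b) stores A's answer for the suffix s.drop j and budget b, with its sum
def MemoOK (s : List Int) (m : PySem.Dict (Int × Int) (Int × List Int)) : Prop :=
  ∀ (i b : Int) (v : Int × List Int), m.get? (i, b) = some v →
    ∃ j : Nat, i = (j : Int) ∧ v = (sumList (large (s.drop j) b), large (s.drop j) b)

lemma memoOK_empty (s : List Int) : MemoOK s PySem.Dict.empty := by
  intro i b v h
  simp [PySem.Dict.get?_empty] at h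

lemma goB_correct (s : List Int) : ∀ (t : List Int) (j : Nat) (b : Int)
    (m : PySem.Dict (Int × Int) (Int × List Int)), t = s.drop j → MemoOK s m →
    (goB t (j : Int) b m).1 = (sumList (large t b), large t b) ∧ MemoOK s (goB t (j : Int) b m).2 := by
  intro t
  induction t with
  | nil =>
    intro j b m ht hm
    simp [goB, large, sumList]
    exact hm
  | cons a t ih =>
    intro j b m ht hm
    have htail : t = s.drop (j + 1) := by
      have := congrArg List.tail ht
      simpa [List.tail_drop] using this
    have hcast : (j : Int) + 1 = ((j + 1 : Nat) : Int) := by push_cast; ring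
    cases hget : m.get? ((j : Int), b) with
    | some v =>
      obtain ⟨j', hj, hv⟩ := hm _ _ _ hget
      have : j = j' := by exact_mod_cast hj
      subst this
      constructor
      · simp [goB, hget, hv, ← ht]
      · simpa [goB, hget] using hm
    | none =>
      have h1 := ih (j + 1) b m htail hm
      rw [← hcast] at h1
      by_cases hab : a ≤ b
      · have h2 := ih (j + 1) (b - a) (goB t ((j : Int) + 1) b m).2 htail h1.2
        rw [← hcast] at h2
        -- the value computed at this node is A's answer for a :: t, paired with its sum
        have hres : (if a + (goB t ((j:Int) + 1) (b - a) (goB t ((j:Int) + 1) b m).2).1.1 >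
              (goB t ((j:Int) + 1) b m).1.1 then
              (a + (goB t ((j:Int) + 1) (b - a) (goB t ((j:Int) + 1) b m).2).1.1,
               a :: (goB t ((j:Int) + 1) (b - a) (goB t ((j:Int) + 1) b m).2).1.2)
            else (goB t ((j:Int) + 1) b m).1)
            = (sumList (large (a :: t) b), large (a :: t) b) := by
          rw [h1.1, h2.1]
          have hnot : ¬ a > b := not_lt.mpr hab
          simp only [large, hnot, if_false, sumList]
          by_cases hc : a + sumList (large t (b - a)) > sumList (large t b) <;>
            simp [hc, sumList]
        constructor
        · simp only [goB, hget]
          simp only [if_pos hab]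
          simpa using hres
        · intro i' b' v' hv'
          simp only [goB, hget] at hv'
          simp only [if_pos hab] at hv'
          rw [PySem.Dict.get?_insert] at hv'
          by_cases he : (i', b') = ((j : Int), b)
          · rw [if_pos he] at hv'
            obtain ⟨hi, hb⟩ := Prod.mk.injEq .. ▸ he
            refine ⟨j, by simp [hi], ?_⟩
            have hv2 := Option.some.inj hv'
            rw [hb, ← ht, ← hv2]
            exact hres
          · rw [if_neg he] at hv'
            exact h2.2 _ _ _ hv'
      · have hres : (goB t ((j:Int) + 1) b m).1 = (sumList (large (a :: t) b), large (a :: t) b) := by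
          rw [h1.1]
          have hgt : a > b := not_le.mp hab
          simp [large, hgt]
        constructor
        · simp only [goB, hget]
          simp only [if_neg hab]
          simpa using hres
        · intro i' b' v' hv'
          simp only [goB, hget] at hv'
          simp only [if_neg hab] at hv'
          rw [PySem.Dict.get?_insert] at hv'
          by_cases he : (i', b') = ((j : Int), b)
          · rw [if_pos he] at hv'
            obtain ⟨hi, hb⟩ := Prod.mk.injEq .. ▸ he
            refine ⟨j, by simp [hi], ?_⟩
            have hv2 := Option.some.inj hv'
            rw [hb, ← ht, ← hv2]
            exact hres
          · rw [if_neg he] at hv'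
            exact h1.2 _ _ _ hv'

-- ===== VERDICT (by name: the statement is the Claim_ definition above) =====
theorem large_spec : Claim_equal_large := by
  intro s n _
  unfold Spec_large large_alt
  have h := goB_correct s s 0 n PySem.Dict.empty (by simp) (memoOK_empty s)
  have h0 : ((0 : Nat) : Int) = (0 : Int) := rfl
  rw [h0] at h
  rw [h.1]
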